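-- pv_equiv track=rewrite | github.com/silentsit/auto_trade | market_structure_analyzer.py | _find_swing_points
-- ===== SOURCE A (Python) =====
-- def _find_swing_points(prices, point_type, window=5):
--     """Find swing highs or lows."""
--     swing_points = []
--
--     if len(prices) < 2 * window + 1:
--         return swing_points
--
--     for i in range(window, len(prices) - window):
--         if point_type == 'high':
--             # Check if this is a local maximum
--             is_swing = all(prices[i] >= prices[i-j] for j in range(1, window+1)) and \
--                        all(prices[i] >= prices[i+j] for j in range(1, window+1))
--         else:
--             # Check if this is a local minimum
--             is_swing = all(prices[i] <= prices[i-j] for j in range(1, window+1)) and \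
--                        all(prices[i] <= prices[i+j] for j in range(1, window+1))
--
--         if is_swing:
--             swing_points.append(prices[i])
--
--     return swing_points
-- ===== SOURCE B (Python) =====
-- def _find_swing_points(prices, point_type, window=5):
--     """Find swing highs or lows via a single pass with a monotonic queue of window extremes."""
--     n = len(prices)
--     if n < 2 * window + 1:
--         return []
--     # Unify: a swing point is an index whose value equals the window maximum of `vals`.
--     vals = prices if point_type == 'high' else [-p for p in prices]
--     span = 2 * window + 1
--     dq = []      # indices with strictly decreasing vals; front at dq[head]
--     head = 0
--     out = []
--     for r in range(n):
--         while len(dq) > head and vals[dq[-1]] <= vals[r]: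
--             dq.pop()
--         dq.append(r)
--         if dq[head] <= r - span:
--             head += 1
--         if r >= span - 1:
--             c = r - window
--             if vals[c] == vals[dq[head]]:
--                 out.append(prices[c])
--     return out
-- ===== Notes on version B (the rewrite author's own statement) =====
-- stated objective: alternative
-- what changed: Replaces the per-index neighbour scans with a single pass maintaining a monotonic queue of candidate window extremes (minima handled by negating once), testing each centre against the queue front; Pre_ excludes negative window, on which A always raises IndexError.
import Mathlib
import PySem

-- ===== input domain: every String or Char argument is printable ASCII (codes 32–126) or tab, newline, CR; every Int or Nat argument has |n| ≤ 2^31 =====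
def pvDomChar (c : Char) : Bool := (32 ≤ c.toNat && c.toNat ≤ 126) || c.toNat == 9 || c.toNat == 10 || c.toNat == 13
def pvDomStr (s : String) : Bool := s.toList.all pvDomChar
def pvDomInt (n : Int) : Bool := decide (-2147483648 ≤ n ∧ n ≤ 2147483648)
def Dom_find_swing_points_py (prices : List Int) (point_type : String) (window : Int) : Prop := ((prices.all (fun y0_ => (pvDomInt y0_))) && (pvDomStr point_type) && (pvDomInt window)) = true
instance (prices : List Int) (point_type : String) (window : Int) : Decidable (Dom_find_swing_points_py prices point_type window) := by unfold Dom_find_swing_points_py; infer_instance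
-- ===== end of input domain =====

-- B changes the algorithm: one pass with a monotonic queue of window extremes instead of
-- A's per-index neighbour scans.  Equivalence is claimed for window ≥ 0 (Pre_);
-- for window < 0 the Python A always raises IndexError.

-- ===== PORT A =====
-- literal transliteration of A's nested scans (indexing via PySem.List.pyGetD; under
-- Pre_ every index A touches is in range, so the default is never read)
def find_swing_points_py (prices : List Int) (point_type : String) (window : Int) : List Int :=
  if (prices.length : Int) < 2 * window + 1 then []
  else
    (PySem.List.pyRange window ((prices.length : Int) - window) 1).foldl
      (fun acc i =>
        let is_swing :=
          if point_type = "high" then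
            ((PySem.List.pyRange 1 (window + 1) 1).all
              (fun j => decide (PySem.List.pyGetD prices i 0 ≥ PySem.List.pyGetD prices (i - j) 0))) &&
            ((PySem.List.pyRange 1 (window + 1) 1).all
              (fun j => decide (PySem.List.pyGetD prices i 0 ≥ PySem.List.pyGetD prices (i + j) 0)))
          else
            ((PySem.List.pyRange 1 (window + 1) 1).all
              (fun j => decide (PySem.List.pyGetD prices i 0 ≤ PySem.List.pyGetD prices (i - j) 0))) &&
            ((PySem.List.pyRange 1 (window + 1) 1).all
              (fun j => decide (PySem.List.pyGetD prices i 0 ≤ PySem.List.pyGetD prices (i + j) 0)))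
        if is_swing then acc ++ [PySem.List.pyGetD prices i 0] else acc)
      []

-- ===== PORT B =====
-- the 'while len(dq) > head and vals[dq[-1]] <= vals[r]: dq.pop()' loop of Source B
def pvPop (vals : List Int) (v : Int) (head : Nat) (dq : List Nat) : List Nat :=
  if h : head < dq.length then
    if vals.getD (dq.getLast (List.ne_nil_of_length_pos (Nat.lt_of_le_of_lt (Nat.zero_le _) h))) 0 ≤ v then
      pvPop vals v head dq.dropLast
    else dq
  else dq
termination_by dq.length
decreasing_by simp [List.length_dropLast]; omega

-- transliteration of Source B: deque indices are Nat (they are positions into `prices`;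
-- Source B's `dq[head] <= r - span` is written `dq[head] + span ≤ r`, exact over ℤ≥0, and
-- `r >= span - 1` as `span ≤ r + 1`)
def find_swing_points_py_alt (prices : List Int) (point_type : String) (window : Int) : List Int :=
  if (prices.length : Int) < 2 * window + 1 then []
  else
    let vals := if point_type = "high" then prices else prices.map (fun p => -p)
    let span := (2 * window + 1).toNat
    let w := window.toNat
    let res := (List.range prices.length).foldl
      (fun st r =>
        let dq := pvPop vals (vals.getD r 0) st.2.1 st.1 ++ [r]
        let head := if dq.getD st.2.1 0 + span ≤ r then st.2.1 + 1 else st.2.1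
        let out :=
          if span ≤ r + 1 then
            let c := r - w
            if vals.getD c 0 = vals.getD (dq.getD head 0) 0 then st.2.2 ++ [prices.getD c 0]
            else st.2.2
          else st.2.2
        (dq, head, out))
      ([], 0, [])
    res.2.2

-- ===== PRECONDITION & SPEC =====
-- Pre_ excludes window < 0: there A always raises IndexError (its index loop always
-- reaches an out-of-range position), so A returns on exactly the inputs admitted here.
def Pre_find_swing_points_py (prices : List Int) (point_type : String) (window : Int) : Prop :=
  0 ≤ window
instance (prices : List Int) (point_type : String) (window : Int) : Decidable (Pre_find_swing_points_py prices point_type window) := by unfold Pre_find_swing_points_py; infer_instance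

def pvWitness_find_swing_points_py : List Int × String × Int := ([3, 1, 4, 1, 5, 9, 2], "high", 1)

def Spec_find_swing_points_py (prices : List Int) (point_type : String) (window : Int) (out : List Int) : Prop := out = find_swing_points_py_alt prices point_type window
instance (prices : List Int) (point_type : String) (window : Int) (out : List Int) : Decidable (Spec_find_swing_points_py prices point_type window out) := by unfold Spec_find_swing_points_py; infer_instance

-- ===== CLAIM (what is proved, stated in full; the proofs are below) =====
def Claim_equal_find_swing_points_py : Prop := ∀ (prices : List Int) (point_type : String) (window : Int), Dom_find_swing_points_py prices point_type window → Pre_find_swing_points_py prices point_type window → Spec_find_swing_points_py prices point_type window (find_swing_points_py prices point_type window)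

-- ===== LEMMAS AND PROOFS =====

-- `vals` as Source B computes it
def pvVals (prices : List Int) (point_type : String) : List Int :=
  if point_type = "high" then prices else prices.map (fun p => -p)

-- "index c carries the maximum of `vals` over the window [c-w, c+w]"
def pvGood (vals : List Int) (w c : Nat) : Bool :=
  (List.range (2*w+1)).all (fun t => decide (vals.getD (c - w + t) 0 ≤ vals.getD c 0))

-- the common characterisation of both programs' output, for the first k centres
def pvSpec (prices vals : List Int) (w k : Nat) : List Int :=
  (((List.range k).map (· + w)).filter (fun c => pvGood vals w c)).map (fun c => prices.getD c 0)

-- the body of Source B's loop, named for the proofs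
def pvStep (vals prices : List Int) (span w : Nat) (st : List Nat × Nat × List Int) (r : Nat) :
    List Nat × Nat × List Int :=
  let dq := pvPop vals (vals.getD r 0) st.2.1 st.1 ++ [r]
  let head := if dq.getD st.2.1 0 + span ≤ r then st.2.1 + 1 else st.2.1
  let out :=
    if span ≤ r + 1 then
      let c := r - w
      if vals.getD c 0 = vals.getD (dq.getD head 0) 0 then st.2.2 ++ [prices.getD c 0]
      else st.2.2
    else st.2.2
  (dq, head, out)

-- pvPop seen from the effective deque (most recent first)
def pvPopRev (vals : List Int) (v : Int) : List Nat → List Nat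
  | [] => []
  | x :: xs => if vals.getD x 0 ≤ v then pvPopRev vals v xs else x :: xs

lemma pv_dropLast_drop (l : List Nat) (n : Nat) : l.dropLast.drop n = (l.drop n).dropLast := by
  rcases Nat.le_total l.length n with h | h
  · rw [List.drop_eq_nil_of_le h, List.drop_eq_nil_of_le (by simp; omega)]
    simp
  · apply List.ext_getElem
    · simp [List.length_dropLast]; omega
    · intro i h1 h2
      simp [List.getElem_dropLast, List.getElem_drop]

lemma pvPop_le_length (vals : List Int) (v : Int) (head : Nat) :
    ∀ dq : List Nat, head ≤ dq.length → head ≤ (pvPop vals v head dq).length := by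
  intro dq
  induction hm : dq.length using Nat.strong_induction_on generalizing dq with
  | _ m ih =>
    intro hh
    rw [pvPop]
    subst hm
    split
    · split
      · refine ih dq.dropLast.length ?_ dq.dropLast rfl ?_ <;>
          simp_all [List.length_dropLast] <;> omega
      · exact hh
    · exact hh

lemma pvPop_drop (vals : List Int) (v : Int) (head : Nat) :
    ∀ dq : List Nat, head ≤ dq.length →
      (pvPop vals v head dq).drop head = (pvPopRev vals v ((dq.drop head).reverse)).reverse := by
  intro dq
  induction hm : dq.length using Nat.strong_induction_on generalizing dq with
  | _ m ih =>
    intro hh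
    rw [pvPop]
    subst hm
    split
    · rename_i hlt
      have hne : dq ≠ [] := List.ne_nil_of_length_pos (Nat.lt_of_le_of_lt (Nat.zero_le _) hlt)
      have hEne : dq.drop head ≠ [] := by
        intro hE
        have := List.length_drop (l := dq) (i := head)
        rw [hE] at this
        simp at this
        omega
      have hlast : (dq.drop head).getLast hEne = dq.getLast hne := List.getLast_drop hEne
      have hdec : (dq.drop head).reverse
          = dq.getLast hne :: ((dq.drop head).dropLast).reverse := by
        conv_lhs => rw [← List.dropLast_concat_getLast hEne]
        rw [List.reverse_append, hlast]
        simp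
      rw [hdec, pvPopRev]
      split
      · rename_i hle
        have hdd : dq.dropLast.drop head = (dq.drop head).dropLast := pv_dropLast_drop dq head
        rw [ih dq.dropLast.length (by simp [List.length_dropLast]; omega) dq.dropLast rfl
              (by simp [List.length_dropLast]; omega), hdd]
      · rename_i hgt
        rw [List.reverse_cons, List.reverse_reverse, ← hlast, List.dropLast_concat_getLast hEne]
    · rename_i hge
      have : dq.drop head = [] := by
        apply List.drop_eq_nil_of_le
        omega
      rw [this]
      simp [pvPopRev]

lemma pvPopRev_sublist (vals : List Int) (v : Int) (R : List Nat) :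
    (pvPopRev vals v R).Sublist R := by
  induction R with
  | nil => simp [pvPopRev]
  | cons x xs ih =>
      rw [pvPopRev]
      split
      · exact ih.cons x
      · exact List.Sublist.refl _

lemma pvPopRev_head (vals : List Int) (v : Int) (R : List Nat) :
    pvPopRev vals v R = [] ∨
      ∃ y ys, pvPopRev vals v R = y :: ys ∧ v < vals.getD y 0 := by
  induction R with
  | nil => left; rfl
  | cons x xs ih =>
      rw [pvPopRev]
      split
      · exact ih
      · right; exact ⟨x, xs, rfl, by omega⟩

lemma pvPopRev_popped (vals : List Int) (v : Int) (R : List Nat) {i : Nat}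
    (hi : i ∈ R) (hni : i ∉ pvPopRev vals v R) : vals.getD i 0 ≤ v := by
  induction R with
  | nil => simp at hi
  | cons x xs ih =>
      rw [pvPopRev] at hni
      by_cases hx : vals.getD x 0 ≤ v
      · rw [if_pos hx] at hni
        rcases List.mem_cons.mp hi with h | h
        · subst h; exact hx
        · exact ih h hni
      · rw [if_neg hx] at hni
        exact absurd hi hni

lemma mem_rel_getLast {α : Type} {rel : α → α → Prop} {R : List α}
    (hp : R.Pairwise rel) (hne : R ≠ []) {i : α} (hi : i ∈ R) :
    i = R.getLast hne ∨ rel i (R.getLast hne) := by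
  have hdec := List.dropLast_concat_getLast hne
  rw [← hdec] at hp hi
  rcases List.mem_append.mp hi with h | h
  · right
    rcases List.pairwise_append.mp hp with ⟨_, _, hrel⟩
    exact hrel i h _ (List.mem_singleton_self _)
  · left
    simpa using h

-- the deque invariant, on the reversed effective deque (most recent index first)
def pvInv (vals : List Int) (w r : Nat) (R : List Nat) : Prop :=
  R.head? = some r ∧
  R.Pairwise (fun a b => b < a) ∧
  R.Pairwise (fun a b => vals.getD a 0 < vals.getD b 0) ∧
  (∀ i ∈ R, r < i + (2*w+1)) ∧
  (∀ j : Nat, j ≤ r → r < j + (2*w+1) →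
    ∃ i ∈ R, j ≤ i ∧ vals.getD j 0 ≤ vals.getD i 0)

lemma pvInv_mem_le {vals : List Int} {w r : Nat} {R : List Nat}
    (h : pvInv vals w r R) {i : Nat} (hi : i ∈ R) : i ≤ r := by
  obtain ⟨hh, hp, -, -, -⟩ := h
  rcases R with _ | ⟨x, xs⟩
  · simp at hh
  · simp at hh
    subst hh
    rcases List.mem_cons.mp hi with h | h
    · omega
    · exact Nat.le_of_lt ((List.pairwise_cons.mp hp).1 i h)

lemma pvInv_ne_nil {vals : List Int} {w r : Nat} {R : List Nat}
    (h : pvInv vals w r R) : R ≠ [] := by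
  obtain ⟨hh, -⟩ := h
  rintro rfl
  simp at hh

lemma pvInv_val_le_getLast {vals : List Int} {w r : Nat} {R : List Nat}
    (h : pvInv vals w r R) (hne : R ≠ []) {i : Nat} (hi : i ∈ R) :
    vals.getD i 0 ≤ vals.getD (R.getLast hne) 0 := by
  obtain ⟨-, -, hv, -, -⟩ := h
  rcases mem_rel_getLast hv hne hi with h | h
  · rw [h]
  · exact le_of_lt h

lemma pvInv_step (vals : List Int) (w r : Nat) (R : List Nat) (h : pvInv vals w r R) :
    pvInv vals w (r+1)
      (if ((r+1) :: pvPopRev vals (vals.getD (r+1) 0) R).getLast (List.cons_ne_nil _ _) + (2*w+1) ≤ r + 1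
       then ((r+1) :: pvPopRev vals (vals.getD (r+1) 0) R).dropLast
       else ((r+1) :: pvPopRev vals (vals.getD (r+1) 0) R)) := by
  obtain ⟨hh, hpi, hpv, hlb, hwit⟩ := h
  set v := vals.getD (r+1) 0 with hv
  set P := pvPopRev vals v R with hPdef
  have hPsub : P.Sublist R := pvPopRev_sublist vals v R
  have hPmem : ∀ i ∈ P, i ∈ R := fun i hi => hPsub.mem hi
  have hRle : ∀ i ∈ R, i ≤ r := fun i hi => pvInv_mem_le ⟨hh, hpi, hpv, hlb, hwit⟩ hi
  have hPpi : P.Pairwise (fun a b => b < a) := List.Pairwise.sublist hPsub hpi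
  have hPpv : P.Pairwise (fun a b => vals.getD a 0 < vals.getD b 0) :=
    List.Pairwise.sublist hPsub hpv
  have hvP : ∀ i ∈ P, v < vals.getD i 0 := by
    rcases pvPopRev_head vals v R with h0 | ⟨y, ys, hyy, hy⟩
    · rw [← hPdef] at h0
      rw [h0]
      intro i hi
      simp at hi
    · rw [← hPdef] at hyy
      intro i hi
      rw [hyy] at hi hPpv
      rcases List.mem_cons.mp hi with h | h
      · subst h; exact hy
      · exact lt_trans hy ((List.pairwise_cons.mp hPpv).1 i h)
  set R' := (r+1) :: P with hR'def
  have hR'pi : R'.Pairwise (fun a b => b < a) := by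
    rw [hR'def, List.pairwise_cons]
    exact ⟨fun b hb => Nat.lt_succ_of_le (hRle b (hPmem b hb)), hPpi⟩
  have hR'pv : R'.Pairwise (fun a b => vals.getD a 0 < vals.getD b 0) := by
    rw [hR'def, List.pairwise_cons]
    exact ⟨fun b hb => hvP b hb, hPpv⟩
  have hR'lb : ∀ i ∈ R', r < i + (2*w+1) := by
    intro i hi
    rcases List.mem_cons.mp hi with h | h
    · omega
    · exact hlb i (hPmem i h)
  have hLmem : R'.getLast (List.cons_ne_nil _ _) ∈ R' := List.getLast_mem _
  have hLmin : ∀ i ∈ R', R'.getLast (List.cons_ne_nil _ _) ≤ i := by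
    intro i hi
    rcases mem_rel_getLast hR'pi (List.cons_ne_nil _ _) hi with h | h
    · omega
    · omega
  by_cases hev : R'.getLast (List.cons_ne_nil _ _) + (2*w+1) ≤ r + 1
  · rw [if_pos hev]
    have hPne : P ≠ [] := by
      rintro hP0
      simp only [hR'def, hP0, List.getLast_singleton] at hev
      omega
    have hdrop : R'.dropLast = (r+1) :: P.dropLast := by
      rcases P with _ | ⟨y, ys⟩
      · exact absurd rfl hPne
      · exact List.dropLast_cons₂
    have hdls : R'.dropLast.Sublist R' := List.dropLast_sublist R'
    have hconc : R'.dropLast ++ [R'.getLast (List.cons_ne_nil _ _)] = R' :=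
      List.dropLast_concat_getLast (List.cons_ne_nil _ _)
    have hgtL : ∀ a ∈ R'.dropLast, R'.getLast (List.cons_ne_nil _ _) < a := by
      intro a ha
      have := hR'pi
      rw [← hconc, List.pairwise_append] at this
      exact this.2.2 a ha _ (List.mem_singleton_self _)
    refine ⟨?_, ?_, ?_, ?_, ?_⟩
    · rw [hdrop]; rfl
    · exact List.Pairwise.sublist hdls hR'pi
    · exact List.Pairwise.sublist hdls hR'pv
    · intro i hi
      have h1 := hgtL i hi
      have h2 := hR'lb _ hLmem
      omega
    · intro j hj hspan
      by_cases hjr : j = r + 1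
      · subst hjr
        exact ⟨r+1, by rw [hdrop]; exact List.mem_cons_self, le_refl _, le_refl _⟩
      · obtain ⟨i, hiR, hji, hvji⟩ := hwit j (by omega) (by omega)
        by_cases hiP : i ∈ P
        · have hiR' : i ∈ R' := List.mem_cons_of_mem _ hiP
          have hiL : i ≠ R'.getLast (List.cons_ne_nil _ _) := by
            intro hiL
            rw [← hiL] at hev
            omega
          have hiR'' : i ∈ R'.dropLast := by
            rcases List.mem_append.mp (hconc ▸ hiR') with h | h
            · exact h
            · simp at h; exact absurd h hiL
          exact ⟨i, hiR'', hji, hvji⟩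
        · have hvi : vals.getD i 0 ≤ v := pvPopRev_popped vals v R hiR hiP
          exact ⟨r+1, by rw [hdrop]; exact List.mem_cons_self, by omega, le_trans hvji hvi⟩
  · rw [if_neg hev]
    refine ⟨rfl, hR'pi, hR'pv, ?_, ?_⟩
    · intro i hi
      have := hLmin i hi
      omega
    · intro j hj hspan
      by_cases hjr : j = r + 1
      · subst hjr
        exact ⟨r+1, List.mem_cons_self, le_refl _, le_refl _⟩
      · obtain ⟨i, hiR, hji, hvji⟩ := hwit j (by omega) (by omega)
        by_cases hiP : i ∈ P
        · exact ⟨i, List.mem_cons_of_mem _ hiP, hji, hvji⟩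
        · have hvi : vals.getD i 0 ≤ v := pvPopRev_popped vals v R hiR hiP
          exact ⟨r+1, List.mem_cons_self, by omega, le_trans hvji hvi⟩

lemma pvInv_front {vals : List Int} {w r : Nat} {R : List Nat}
    (h : pvInv vals w r R) (hr : 2*w ≤ r) (hne : R ≠ []) :
    (vals.getD (r - w) 0 = vals.getD (R.getLast hne) 0) ↔ pvGood vals w (r - w) = true := by
  obtain ⟨hh, hpi, hpv, hlb, hwit⟩ := h
  have hInv : pvInv vals w r R := ⟨hh, hpi, hpv, hlb, hwit⟩
  set L := R.getLast hne with hL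
  have hLmem : L ∈ R := List.getLast_mem hne
  have hLle : L ≤ r := pvInv_mem_le hInv hLmem
  have hLlb : r < L + (2*w+1) := hlb L hLmem
  constructor
  · intro heq
    unfold pvGood
    rw [List.all_eq_true]
    intro t ht
    rw [List.mem_range] at ht
    rw [decide_eq_true_iff]
    set j := r - w - w + t with hj
    obtain ⟨i, hiR, hji, hvji⟩ := hwit j (by omega) (by omega)
    calc vals.getD j 0 ≤ vals.getD i 0 := hvji
      _ ≤ vals.getD L 0 := pvInv_val_le_getLast hInv hne hiR
      _ = vals.getD (r - w) 0 := heq.symm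
  · intro hgood
    unfold pvGood at hgood
    rw [List.all_eq_true] at hgood
    have h1 : vals.getD L 0 ≤ vals.getD (r - w) 0 := by
      have ht := hgood (L - (r - 2*w)) (by rw [List.mem_range]; omega)
      rw [decide_eq_true_iff] at ht
      have : r - w - w + (L - (r - 2*w)) = L := by omega
      rwa [this] at ht
    have h2 : vals.getD (r - w) 0 ≤ vals.getD L 0 := by
      obtain ⟨i, hiR, hji, hvji⟩ := hwit (r - w) (by omega) (by omega)
      exact le_trans hvji (pvInv_val_le_getLast hInv hne hiR)
    omega

lemma pv_getLast_of_drop {dq : List Nat} {head : Nat} {R : List Nat}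
    (hR : (dq.drop head).reverse = R) (hne : R ≠ []) :
    dq.getD head 0 = R.getLast hne := by
  have hdrop : dq.drop head = R.reverse := by rw [← hR, List.reverse_reverse]
  have h0 : dq[head]? = (dq.drop head)[0]? := by
    rw [List.getElem?_drop]
    norm_num
  rw [List.getD_eq_getElem?_getD, h0, hdrop]
  have hrne : R.reverse ≠ [] := by simpa using hne
  rcases hrev : R.reverse with _ | ⟨a, t⟩
  · exact absurd hrev hrne
  · have h1 : R.getLast? = some (R.getLast hne) := List.getLast?_eq_some_getLast hne
    have h2 : R.getLast? = R.reverse.head? := by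
      rw [List.getLast?_eq_head?_reverse]
    rw [hrev] at h2
    simp at h2
    rw [h1] at h2
    simp at h2
    simp [h2]

lemma pvSpec_succ (prices vals : List Int) (w k : Nat) :
    pvSpec prices vals w (k+1)
      = pvSpec prices vals w k
        ++ (if pvGood vals w (k+w) then [prices.getD (k+w) 0] else []) := by
  unfold pvSpec
  rw [List.range_succ, List.map_append, List.filter_append, List.map_append]
  congr 1
  simp only [List.map_cons, List.map_nil, List.filter]
  split <;> simp_all

-- the state invariant of Source B's loop
def pvStInv (vals prices : List Int) (w r : Nat) (st : List Nat × Nat × List Int) : Prop :=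
  st.2.1 ≤ st.1.length ∧
  pvInv vals w r ((st.1.drop st.2.1).reverse) ∧
  st.2.2 = pvSpec prices vals w (r + 1 - 2*w)

lemma pvStInv_step (vals prices : List Int) (w r : Nat) (st : List Nat × Nat × List Int)
    (h : pvStInv vals prices w r st) :
    pvStInv vals prices w (r+1) (pvStep vals prices (2*w+1) w st (r+1)) := by
  obtain ⟨dq, head, out⟩ := st
  obtain ⟨hlen, hInv, hout⟩ := h
  simp only at hlen hInv hout
  set v := vals.getD (r+1) 0 with hvdef
  set R := (dq.drop head).reverse with hRdef
  set P := pvPopRev vals v R with hPdef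
  set R' := (r+1) :: P with hR'def
  set dq' := pvPop vals v head dq ++ [r+1] with hdq'def
  have hplen : head ≤ (pvPop vals v head dq).length := pvPop_le_length vals v head dq hlen
  have hdrop1 : dq'.drop head = P.reverse ++ [r+1] := by
    rw [hdq'def, List.drop_append_of_le_length hplen, pvPop_drop vals v head dq hlen]
  have hRfull : (dq'.drop head).reverse = R' := by
    rw [hdrop1, hR'def]
    simp
  have hfront : dq'.getD head 0 = R'.getLast (List.cons_ne_nil _ _) :=
    pv_getLast_of_drop hRfull (List.cons_ne_nil _ _)
  have hInvNew := pvInv_step vals w r R hInv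
  have hlendrop : dq'.length = head + (P.reverse ++ [r+1]).length := by
    have h1 : (dq'.drop head).length = dq'.length - head := List.length_drop
    rw [hdrop1] at h1
    have h2 : head ≤ dq'.length := by
      rw [hdq'def]
      simp
      omega
    omega
  unfold pvStep
  simp only
  rw [← hvdef, ← hdq'def]
  simp only [hfront]
  by_cases hev : R'.getLast (List.cons_ne_nil _ _) + (2*w+1) ≤ r + 1
  · rw [if_pos hev] at hInvNew
    simp only [if_pos hev]
    have hdrop2 : (dq'.drop (head+1)).reverse = R'.dropLast := by
      rw [List.drop_add_one_eq_tail_drop]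
      have hE : dq'.drop head = R'.reverse := by rw [← hRfull, List.reverse_reverse]
      rw [hE, List.tail_reverse, List.reverse_reverse]
    have hne2 : R'.dropLast ≠ [] := pvInv_ne_nil hInvNew
    have hfront2 : dq'.getD (head+1) 0 = R'.dropLast.getLast hne2 :=
      pv_getLast_of_drop hdrop2 hne2
    simp only [hfront2]
    refine ⟨?_, ?_, ?_⟩
    · simp only
      rw [hlendrop]
      simp
    · simp only
      rw [hdrop2]
      exact hInvNew
    · simp only
      by_cases hsp : 2*w+1 ≤ r+1+1
      · rw [if_pos hsp]
        have hkk : r+1+1 - 2*w = (r+1-2*w) + 1 := by omega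
        rw [hkk, pvSpec_succ, hout]
        have hcw : r+1-2*w + w = r+1-w := by omega
        rw [hcw]
        have hiff := pvInv_front hInvNew (by omega) hne2
        split
        · rename_i hcond
          rw [if_pos (hiff.mp hcond)]
        · rename_i hcond
          rw [if_neg (fun hg => hcond (hiff.mpr hg))]
          simp
      · rw [if_neg hsp]
        have : r+1+1-2*w = r+1-2*w := by omega
        rw [this]
        exact hout
  · rw [if_neg hev] at hInvNew
    simp only [if_neg hev]
    refine ⟨?_, ?_, ?_⟩
    · simp only
      rw [hlendrop]
      simp
    · simp only
      rw [hRfull]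
      exact hInvNew
    · simp only [hfront]
      by_cases hsp : 2*w+1 ≤ r+1+1
      · rw [if_pos hsp]
        have hkk : r+1+1 - 2*w = (r+1-2*w) + 1 := by omega
        rw [hkk, pvSpec_succ, hout]
        have hcw : r+1-2*w + w = r+1-w := by omega
        rw [hcw]
        have hiff := pvInv_front hInvNew (by omega) (List.cons_ne_nil _ _)
        split
        · rename_i hcond
          rw [if_pos (hiff.mp hcond)]
        · rename_i hcond
          rw [if_neg (fun hg => hcond (hiff.mpr hg))]
          simp
      · rw [if_neg hsp]
        have : r+1+1-2*w = r+1-2*w := by omega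
        rw [this]
        exact hout

lemma pvStInv_base (vals prices : List Int) (w : Nat) :
    pvStInv vals prices w 0 (pvStep vals prices (2*w+1) w ([], 0, []) 0) := by
  have h0 : pvPop vals (vals.getD 0 0) 0 [] = [] := by rw [pvPop]; simp
  unfold pvStep
  simp only [h0, List.nil_append]
  have hc : ¬ (([0] : List Nat).getD 0 0 + (2*w+1) ≤ 0) := by simp
  simp only [if_neg hc]
  refine ⟨by simp, ?_, ?_⟩
  · show pvInv vals w 0 [0]
    refine ⟨rfl, by simp, by simp, ?_, ?_⟩
    · intro i hi
      simp at hi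
      omega
    · intro j hj hsp
      interval_cases j
      exact ⟨0, by simp, le_refl _, le_refl _⟩
  · simp only
    by_cases hw : 2*w+1 ≤ 0+1
    · have hw0 : w = 0 := by omega
      subst hw0
      rw [if_pos hw]
      have : vals.getD (0 - 0) 0 = vals.getD (([0] : List Nat).getD 0 0) 0 := rfl
      rw [if_pos this]
      have hg : pvGood vals 0 0 = true := by
        unfold pvGood
        simp
      simp [pvSpec, hg]
    · rw [if_neg hw]
      have : 0 + 1 - 2*w = 0 := by omega
      rw [this]
      simp [pvSpec]

lemma pvStInv_fold (vals prices : List Int) (w : Nat) (r : Nat) :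
    pvStInv vals prices w r
      ((List.range (r+1)).foldl (pvStep vals prices (2*w+1) w) ([], 0, [])) := by
  induction r with
  | zero => exact pvStInv_base vals prices w
  | succ r ih =>
      rw [List.range_succ, List.foldl_append]
      exact pvStInv_step vals prices w r _ ih

lemma alt_eq_spec (prices : List Int) (pt : String) (window : Int)
    (h0 : 0 ≤ window) (hg : ¬ ((prices.length : Int) < 2 * window + 1)) :
    find_swing_points_py_alt prices pt window
      = pvSpec prices (pvVals prices pt) window.toNat (prices.length - 2 * window.toNat) := by
  unfold find_swing_points_py_alt
  rw [if_neg hg]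
  show ((List.range prices.length).foldl
      (pvStep (pvVals prices pt) prices ((2*window+1).toNat) window.toNat) ([], 0, [])).2.2 = _
  have hspan : (2*window+1).toNat = 2*window.toNat+1 := by omega
  rw [hspan]
  have hn1 : prices.length - 1 + 1 = prices.length := by omega
  have hfold := pvStInv_fold (pvVals prices pt) prices window.toNat (prices.length - 1)
  obtain ⟨-, -, hout⟩ := hfold
  rw [hn1] at hout
  exact hout

lemma pv_getD_map_neg (l : List Int) (j : Nat) :
    (l.map (fun p => -p)).getD j 0 = -(l.getD j 0) := by
  rcases Nat.lt_or_ge j l.length with h | h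
  · rw [List.getD_eq_getElem _ _ (by simpa using h), List.getD_eq_getElem _ _ h]
    simp
  · rw [List.getD_eq_default _ _ (by simpa using h), List.getD_eq_default _ _ h]
    simp

lemma pv_high_eq (prices : List Int) (w k : Nat) :
    ((PySem.List.pyRange 1 ((w:Int)+1) 1).all
        (fun j => decide (PySem.List.pyGetD prices ((w:Int)+(k:Int)) 0
          ≥ PySem.List.pyGetD prices ((w:Int)+(k:Int) - j) 0)) &&
     (PySem.List.pyRange 1 ((w:Int)+1) 1).all
        (fun j => decide (PySem.List.pyGetD prices ((w:Int)+(k:Int)) 0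
          ≥ PySem.List.pyGetD prices ((w:Int)+(k:Int) + j) 0)))
    = pvGood prices w (k+w) := by
  have hcast : ∀ (i : Int) (m : Nat), i = (m : Int) →
      PySem.List.pyGetD prices i 0 = prices.getD m 0 := by
    intro i m hi
    rw [hi, PySem.List.pyGetD_natCast]
  apply Bool.coe_iff_coe.mp
  simp only [Bool.and_eq_true, List.all_eq_true, PySem.List.mem_pyRange_one,
    decide_eq_true_iff, pvGood, List.mem_range, ge_iff_le, and_imp]
  rw [hcast ((w:Int)+(k:Int)) (k+w) (by push_cast; ring)]
  constructor
  · rintro ⟨hL, hR⟩ t ht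
    rcases Nat.lt_trichotomy t w with h | h | h
    · have := hL ((w - t : Nat) : Int) (by push_cast; omega) (by push_cast; omega)
      rw [hcast ((w:Int)+(k:Int) - ((w - t : Nat) : Int)) (k+w-w+t) (by push_cast; omega)] at this
      exact this
    · rw [h]
      have : k + w - w + w = k + w := by omega
      rw [this]
    · have := hR ((t - w : Nat) : Int) (by push_cast; omega) (by push_cast; omega)
      rw [hcast ((w:Int)+(k:Int) + ((t - w : Nat) : Int)) (k+w-w+t) (by push_cast; omega)] at this
      exact this
  · intro hAll
    constructor
    · intro j h1 h2
      have := hAll (w - j.toNat) (by omega)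
      rw [hcast ((w:Int)+(k:Int) - j) (k+w-w+(w - j.toNat)) (by push_cast; omega)]
      exact this
    · intro j h1 h2
      have := hAll (w + j.toNat) (by omega)
      rw [hcast ((w:Int)+(k:Int) + j) (k+w-w+(w + j.toNat)) (by push_cast; omega)]
      exact this

lemma pv_low_eq (prices : List Int) (w k : Nat) :
    ((PySem.List.pyRange 1 ((w:Int)+1) 1).all
        (fun j => decide (PySem.List.pyGetD prices ((w:Int)+(k:Int)) 0
          ≤ PySem.List.pyGetD prices ((w:Int)+(k:Int) - j) 0)) &&
     (PySem.List.pyRange 1 ((w:Int)+1) 1).all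
        (fun j => decide (PySem.List.pyGetD prices ((w:Int)+(k:Int)) 0
          ≤ PySem.List.pyGetD prices ((w:Int)+(k:Int) + j) 0)))
    = pvGood (prices.map (fun p => -p)) w (k+w) := by
  have hcast : ∀ (i : Int) (m : Nat), i = (m : Int) →
      PySem.List.pyGetD prices i 0 = prices.getD m 0 := by
    intro i m hi
    rw [hi, PySem.List.pyGetD_natCast]
  apply Bool.coe_iff_coe.mp
  simp only [Bool.and_eq_true, List.all_eq_true, PySem.List.mem_pyRange_one,
    decide_eq_true_iff, pvGood, List.mem_range, and_imp, pv_getD_map_neg,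
    neg_le_neg_iff]
  rw [hcast ((w:Int)+(k:Int)) (k+w) (by push_cast; ring)]
  constructor
  · rintro ⟨hL, hR⟩ t ht
    rcases Nat.lt_trichotomy t w with h | h | h
    · have := hL ((w - t : Nat) : Int) (by push_cast; omega) (by push_cast; omega)
      rw [hcast ((w:Int)+(k:Int) - ((w - t : Nat) : Int)) (k+w-w+t) (by push_cast; omega)] at this
      exact this
    · rw [h]
      have : k + w - w + w = k + w := by omega
      rw [this]
    · have := hR ((t - w : Nat) : Int) (by push_cast; omega) (by push_cast; omega)
      rw [hcast ((w:Int)+(k:Int) + ((t - w : Nat) : Int)) (k+w-w+t) (by push_cast; omega)] at this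
      exact this
  · intro hAll
    constructor
    · intro j h1 h2
      have := hAll (w - j.toNat) (by omega)
      rw [hcast ((w:Int)+(k:Int) - j) (k+w-w+(w - j.toNat)) (by push_cast; omega)]
      exact this
    · intro j h1 h2
      have := hAll (w + j.toNat) (by omega)
      rw [hcast ((w:Int)+(k:Int) + j) (k+w-w+(w + j.toNat)) (by push_cast; omega)]
      exact this

lemma a_eq_spec (prices : List Int) (pt : String) (window : Int)
    (h0 : 0 ≤ window) (hg : ¬ ((prices.length : Int) < 2 * window + 1)) :
    find_swing_points_py prices pt window
      = pvSpec prices (pvVals prices pt) window.toNat (prices.length - 2 * window.toNat) := by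
  unfold find_swing_points_py
  rw [if_neg hg]
  have hwin : window = ((window.toNat : Nat) : Int) := by omega
  rw [hwin]
  set w := window.toNat with hwdef
  rw [PySem.List.pyRange_one ((w:Int)) ((prices.length : Int) - (w:Int))]
  have hm : (((prices.length : Int) - (w:Int)) - (w:Int)).toNat = prices.length - 2*w := by omega
  rw [hm, List.foldl_map]
  unfold pvSpec
  rw [List.filter_map, List.map_map]
  by_cases hpt : pt = "high"
  · simp only [if_pos hpt]
    rw [PySem.List.foldl_append_if]
    rw [List.nil_append]
    have hvals : pvVals prices pt = prices := by rw [pvVals, if_pos hpt]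
    rw [hvals]
    rw [List.filter_congr (fun k _ => pv_high_eq prices w k)]
    apply List.map_eq_map_iff.mpr
    intro k _
    simp only [Function.comp]
    have : ((w:Int) + (k:Int)) = ((k + w : Nat) : Int) := by push_cast; ring
    rw [this, PySem.List.pyGetD_natCast, Int.toNat_natCast]
  · simp only [if_neg hpt]
    rw [PySem.List.foldl_append_if]
    rw [List.nil_append]
    have hvals : pvVals prices pt = prices.map (fun p => -p) := by rw [pvVals, if_neg hpt]
    rw [hvals]
    rw [List.filter_congr (fun k _ => pv_low_eq prices w k)]
    apply List.map_eq_map_iff.mpr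
    intro k _
    simp only [Function.comp]
    have : ((w:Int) + (k:Int)) = ((k + w : Nat) : Int) := by push_cast; ring
    rw [this, PySem.List.pyGetD_natCast, Int.toNat_natCast]

-- ===== VERDICT (by name: the statement is the Claim_ definition above) =====
theorem find_swing_points_py_spec : Claim_equal_find_swing_points_py := by
  intro prices pt window _ hpre
  unfold Spec_find_swing_points_py
  by_cases hg : (prices.length : Int) < 2 * window + 1
  · unfold find_swing_points_py find_swing_points_py_alt
    rw [if_pos hg, if_pos hg]
  · rw [a_eq_spec prices pt window hpre hg, alt_eq_spec prices pt window hpre hg]
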